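-- pv_equiv track=rewrite | github.com/n3h3m/django-flex | django_flex/permissions.py | fields_allowed
-- ===== SOURCE A (Python) =====
-- def field_matches_pattern(field: str, pattern: str) -> bool:
--     """
--     Check if a field matches an allowed pattern.
--
--     Args:
--         field: Field path to check (e.g., 'name', 'customer.email')
--         pattern: Pattern to match against
--
--     Pattern types:
--         '*' - All base fields on model (NOT nested)
--         'customer.*' - All fields on customer relation
--         'customer.email' - Exact field match
--
--     Returns:
--         True if field matches pattern, False otherwise
--
--     Examples:
--         >>> field_matches_pattern('name', '*')
--         True
--         >>> field_matches_pattern('customer.name', '*')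
--         False
--         >>> field_matches_pattern('customer.name', 'customer.*')
--         True
--     """
--     # "*" matches only base (non-nested) fields
--     if pattern == "*":
--         # Nested fields contain ".", so only match if no dots
--         return "." not in field
--
--     if pattern.endswith(".*"):
--         # Relation wildcard: customer.* matches customer.name, customer.email
--         prefix = pattern[:-2]
--         return field.startswith(prefix + ".")
--
--     # Exact match
--     return field == pattern
--
-- def fields_allowed(requested_fields, allowed_patterns):
--     """
--     Check if all requested fields are allowed by the patterns.
--
--     Args:
--         requested_fields: List of field names to check
--         allowed_patterns: List of allowed patterns
--
--     Returns:
--         Tuple of (is_allowed, denied_field)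
--     """
--     # Empty patterns = nothing allowed (deny by default)
--     if not allowed_patterns:
--         if requested_fields:
--             return False, requested_fields[0]
--         return True, None
--
--     for field in requested_fields:
--         allowed = False
--         for pattern in allowed_patterns:
--             if field_matches_pattern(field, pattern):
--                 allowed = True
--                 break
--         if not allowed:
--             return False, field
--     return True, None
-- ===== SOURCE B (Python) =====
-- def fields_allowed(requested_fields, allowed_patterns):
--     star = False
--     exact = set()
--     wild = set()
--     for p in allowed_patterns:
--         if p == "*":
--             star = True
--         elif p.endswith(".*"):
--             wild.add(p[:-2])
--         else:
--             exact.add(p)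
--     for field in requested_fields:
--         if star and "." not in field:
--             continue
--         if field in exact:
--             continue
--         if any(field[:i] in wild for i in range(len(field)) if field[i] == "."):
--             continue
--         return False, field
--     return True, None
-- ===== Notes on version B (the rewrite author's own statement) =====
-- stated objective: alternative
-- what changed: Instead of scanning all patterns for every field, B indexes the patterns once into a star flag, an exact-match set and a wildcard-prefix set, then checks each field by set lookups on its dot-delimited prefixes; not measurably faster on the benchmark inputs.
import Mathlib
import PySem

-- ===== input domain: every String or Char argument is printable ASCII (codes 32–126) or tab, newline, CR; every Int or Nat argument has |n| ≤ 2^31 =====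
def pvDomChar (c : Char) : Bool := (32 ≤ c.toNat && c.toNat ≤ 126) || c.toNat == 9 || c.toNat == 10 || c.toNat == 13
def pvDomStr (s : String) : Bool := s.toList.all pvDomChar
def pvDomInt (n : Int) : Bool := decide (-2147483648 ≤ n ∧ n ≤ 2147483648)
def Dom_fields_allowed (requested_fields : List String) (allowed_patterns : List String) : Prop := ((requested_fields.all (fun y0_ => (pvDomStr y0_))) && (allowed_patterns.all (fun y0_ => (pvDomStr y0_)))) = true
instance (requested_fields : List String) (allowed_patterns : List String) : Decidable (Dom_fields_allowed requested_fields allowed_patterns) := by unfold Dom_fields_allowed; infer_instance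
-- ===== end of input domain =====

-- B indexes the patterns once (star flag, exact set, wildcard-prefix set) and checks each
-- field's dot-prefixes against that index, instead of rescanning all patterns per field.

-- ===== PORT A =====
def field_matches_pattern (field : String) (pattern : String) : Bool :=
  if pattern == "*" then
    !(PySem.Str.isIn "." field)
  else if PySem.Str.endswith pattern ".*" then
    -- prefix = pattern[:-2]; field.startswith(prefix + ".")
    PySem.Str.startswith field (PySem.Str.slice pattern none (some (-2)) ++ ".")
  else
    field == pattern

-- inner 'for pattern in allowed_patterns: … break' loop (allowed flag with early break)
def pvInnerA (field : String) : List String → Bool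
  | [] => false
  | p :: rest => if field_matches_pattern field p then true else pvInnerA field rest

-- outer 'for field in requested_fields' loop with early return
def pvLoopA (pats : List String) : List String → Bool × Option String
  | [] => (true, none)
  | f :: rest => if pvInnerA f pats then pvLoopA pats rest else (false, some f)

def fields_allowed (requested_fields : List String) (allowed_patterns : List String) : Bool × Option String :=
  if allowed_patterns.isEmpty then
    match requested_fields with
    | [] => (true, none)
    | f :: _ => (false, some f)
  else
    pvLoopA allowed_patterns requested_fields

-- ===== PORT B =====
-- one step of B's first loop: file pattern p into (star flag, exact set, wildcard-prefix set)
def pvStep (acc : Bool × PySem.Set String × PySem.Set String) (p : String) :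
    Bool × PySem.Set String × PySem.Set String :=
  if p == "*" then (true, acc.2.1, acc.2.2)
  else if PySem.Str.endswith p ".*" then
    (acc.1, acc.2.1, PySem.Set.add acc.2.2 (PySem.Str.slice p none (some (-2))))
  else (acc.1, PySem.Set.add acc.2.1 p, acc.2.2)

def pvBuild (patterns : List String) : Bool × PySem.Set String × PySem.Set String :=
  patterns.foldl pvStep (false, PySem.Set.empty, PySem.Set.empty)

-- 'any(field[:i] in wild for i in range(len(field)) if field[i] == ".")'
def pvAnyPrefix (wild : PySem.Set String) (field : String) : Bool :=
  (List.range field.toList.length).any (fun i =>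
    (PySem.Str.pyGet? field (i : Int) == some '.') &&
      PySem.Set.contains wild (PySem.Str.slice field none (some (i : Int))))

-- the three 'continue' tests of B's field loop
def pvFieldOk (star : Bool) (exact : PySem.Set String) (wild : PySem.Set String) (field : String) : Bool :=
  (star && !(PySem.Str.isIn "." field)) || PySem.Set.contains exact field || pvAnyPrefix wild field

def pvLoopB (star : Bool) (exact : PySem.Set String) (wild : PySem.Set String) : List String → Bool × Option String
  | [] => (true, none)
  | f :: rest => if pvFieldOk star exact wild f then pvLoopB star exact wild rest else (false, some f)

def fields_allowed_alt (requested_fields : List String) (allowed_patterns : List String) : Bool × Option String :=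
  pvLoopB (pvBuild allowed_patterns).1 (pvBuild allowed_patterns).2.1 (pvBuild allowed_patterns).2.2 requested_fields

-- ===== PRECONDITION & SPEC =====
def Spec_fields_allowed (requested_fields : List String) (allowed_patterns : List String) (out : Bool × Option String) : Prop := out = fields_allowed_alt requested_fields allowed_patterns
instance (requested_fields : List String) (allowed_patterns : List String) (out : Bool × Option String) : Decidable (Spec_fields_allowed requested_fields allowed_patterns out) := by unfold Spec_fields_allowed; infer_instance

-- ===== CLAIM (what is proved, stated in full; the proofs are below) =====
def Claim_equal_fields_allowed : Prop := ∀ (requested_fields : List String) (allowed_patterns : List String), Dom_fields_allowed requested_fields allowed_patterns → Spec_fields_allowed requested_fields allowed_patterns (fields_allowed requested_fields allowed_patterns)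

-- ===== LEMMAS AND PROOFS =====

-- 'q + "." is a prefix of l'  ↔  position |q| of l is a dot and l[:|q|] = q
theorem pv_prefix_dot_iff (l q : List Char) :
    (q ++ ['.']) <+: l ↔ q.length < l.length ∧ l[q.length]? = some '.' ∧ l.take q.length = q := by
  constructor
  · rintro ⟨t, rfl⟩
    refine ⟨by simp, ?_, ?_⟩
    · rw [List.append_assoc, List.getElem?_append_right (by omega)]
      simp
    · rw [List.append_assoc]
      exact List.take_left
  · rintro ⟨h1, h2, h3⟩
    refine ⟨l.drop (q.length + 1), ?_⟩
    have hg : l[q.length]'h1 = '.' := by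
      have := List.getElem?_eq_getElem h1
      rw [h2] at this
      exact (Option.some_injective _ this.symm)
    calc q ++ ['.'] ++ l.drop (q.length + 1)
        = l.take q.length ++ l[q.length]'h1 :: l.drop (q.length + 1) := by rw [h3, hg]; simp
      _ = l := by rw [← List.drop_eq_getElem_cons h1]; exact List.take_append_drop _ _

theorem pv_str_eq_iff (s t : String) : s = t ↔ s.toList = t.toList :=
  ⟨fun h => h ▸ rfl, fun h => by simpa using congrArg String.ofList h⟩

theorem pv_anyPrefix_iff (w : PySem.Set String) (f : String) :
    pvAnyPrefix w f = true ↔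
      ∃ i, i < f.toList.length ∧ f.toList[i]? = some '.' ∧
        (PySem.Str.slice f none (some (i : Int))) ∈ w := by
  simp [pvAnyPrefix, List.any_eq_true, List.mem_range]

-- adding wildcard prefix q to the set adds exactly 'f starts with q + "."' to B's test
theorem pv_anyPrefix_add (w : PySem.Set String) (q f : String) :
    pvAnyPrefix (PySem.Set.add w q) f =
      (pvAnyPrefix w f || PySem.Str.startswith f (q ++ ".")) := by
  rw [Bool.eq_iff_iff]
  simp only [pv_anyPrefix_iff, Bool.or_eq_true, PySem.Str.startswith_eq,
    PySem.Chars.startswith_iff, PySem.Set.mem_add]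
  have htl : (q ++ ".").toList = q.toList ++ ['.'] := by
    rw [String.toList_append]; rfl
  rw [htl, pv_prefix_dot_iff]
  constructor
  · rintro ⟨i, hi, hdot, hmem | heq⟩
    · exact Or.inl ⟨i, hi, hdot, hmem⟩
    · refine Or.inr ?_
      have hsl : (PySem.Str.slice f none (some (i : Int))).toList = f.toList.take i := by
        simp [PySem.Str.toList_slice, PySem.Chars.slice_eq_listSlice, PySem.List.slice_to_natCast]
      have hq : f.toList.take i = q.toList := by rw [← hsl, heq]
      have hlen : q.toList.length = i := by
        have := congrArg List.length hq
        rw [List.length_take] at this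
        omega
      exact ⟨by omega, by rw [hlen]; exact hdot, by rw [hlen]; exact hq⟩
  · rintro (⟨i, hi, hdot, hmem⟩ | ⟨h1, h2, h3⟩)
    · exact ⟨i, hi, hdot, Or.inl hmem⟩
    · refine ⟨q.toList.length, h1, h2, Or.inr ?_⟩
      rw [pv_str_eq_iff]
      simp [PySem.Str.toList_slice, PySem.Chars.slice_eq_listSlice, PySem.List.slice_to_natCast]
      exact h3

theorem pv_contains_add (e : PySem.Set String) (p f : String) :
    PySem.Set.contains (PySem.Set.add e p) f = (PySem.Set.contains e f || f == p) := by
  rw [Bool.eq_iff_iff]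
  simp [PySem.Set.mem_add, PySem.Set.contains]

-- one indexing step of B adds exactly 'field matches p' to B's per-field test
theorem pv_fieldOk_step (s : Bool) (e w : PySem.Set String) (p f : String) :
    pvFieldOk (pvStep (s, e, w) p).1 (pvStep (s, e, w) p).2.1 (pvStep (s, e, w) p).2.2 f =
      (pvFieldOk s e w f || field_matches_pattern f p) := by
  unfold pvStep field_matches_pattern
  split_ifs with h1 h2
  · simp only [pvFieldOk]
    generalize PySem.Str.isIn "." f = d
    generalize PySem.Set.contains e f = e'
    generalize pvAnyPrefix w f = w'
    cases s <;> cases d <;> cases e' <;> cases w' <;> rfl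
  · simp only [pvFieldOk, pv_anyPrefix_add]
    generalize (s && !PySem.Str.isIn "." f) = a
    generalize PySem.Set.contains e f = e'
    generalize pvAnyPrefix w f = w'
    generalize PySem.Str.startswith f (PySem.Str.slice p none (some (-2)) ++ ".") = b
    cases a <;> cases e' <;> cases w' <;> cases b <;> rfl
  · simp only [pvFieldOk, pv_contains_add]
    generalize (s && !PySem.Str.isIn "." f) = a
    generalize PySem.Set.contains e f = e'
    generalize pvAnyPrefix w f = w'
    generalize (f == p) = b
    cases a <;> cases e' <;> cases w' <;> cases b <;> rfl

theorem pv_fieldOk_fold (pats : List String) (acc : Bool × PySem.Set String × PySem.Set String) (f : String) :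
    pvFieldOk (pats.foldl pvStep acc).1 (pats.foldl pvStep acc).2.1 (pats.foldl pvStep acc).2.2 f =
      (pvFieldOk acc.1 acc.2.1 acc.2.2 f || pats.any (fun p => field_matches_pattern f p)) := by
  induction pats generalizing acc with
  | nil => simp
  | cons p rest ih =>
    obtain ⟨s, e, w⟩ := acc
    rw [List.foldl_cons, ih, pv_fieldOk_step]
    simp [Bool.or_assoc]

theorem pv_innerA_eq_any (f : String) (pats : List String) :
    pvInnerA f pats = pats.any (fun p => field_matches_pattern f p) := by
  induction pats with
  | nil => rfl
  | cons p rest ih =>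
    simp only [pvInnerA, List.any_cons, ← ih]
    split_ifs with h <;> simp [h]

-- B's indexed per-field test equals A's inner pattern scan
theorem pv_fieldOk_build (pats : List String) (f : String) :
    pvFieldOk (pvBuild pats).1 (pvBuild pats).2.1 (pvBuild pats).2.2 f = pvInnerA f pats := by
  have h0 : pvFieldOk false ([] : List String) ([] : List String) f = false := by
    simp [pvFieldOk, pvAnyPrefix, PySem.Set.contains]
  rw [pvBuild, pv_fieldOk_fold, pv_innerA_eq_any]
  simp [h0]

theorem pv_loops_eq (pats : List String) (fields : List String) :
    pvLoopB (pvBuild pats).1 (pvBuild pats).2.1 (pvBuild pats).2.2 fields = pvLoopA pats fields := by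
  induction fields with
  | nil => rfl
  | cons f rest ih =>
    simp only [pvLoopB, pvLoopA, pv_fieldOk_build, ih]

-- ===== VERDICT (by name: the statement is the Claim_ definition above) =====
theorem fields_allowed_spec : Claim_equal_fields_allowed := by
  intro rf ap _
  show fields_allowed rf ap = fields_allowed_alt rf ap
  unfold fields_allowed fields_allowed_alt
  rw [pv_loops_eq]
  split_ifs with h
  · have hap : ap = [] := by simpa [List.isEmpty_iff] using h
    subst hap
    cases rf with
    | nil => rfl
    | cons f rest =>
      simp [pvLoopA, pvInnerA]
  · rfl
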